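-- pv_equiv track=rewrite | github.com/ahmad-bin-shahid/summer_25_ahmed | promoter_prediction/extract_features.py | tata_box_presence
-- ===== SOURCE A (Python) =====
-- def tata_box_presence(sequence):
--     """Check for TATA box motif variants manually."""
--     sequence = str(sequence).upper()
--     motifs = ["TATAAAA", "TATAATA", "TATATAA", "TATATTA"]
--     for i in range(len(sequence) - 6):
--         window = sequence[i:i+7]
--         if window in motifs:
--             return 1
--     return 0
-- ===== SOURCE B (Python) =====
-- def tata_box_presence(sequence):
--     """Check for TATA box motif variants via substring search."""
--     sequence = str(sequence).upper()
--     return int(any(m in sequence for m in ["TATAAAA", "TATAATA", "TATATAA", "TATATTA"]))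
-- ===== Notes on version B (the rewrite author's own statement) =====
-- stated objective: idiomatic
-- what changed: B loops over the four motifs and delegates the scan to Python's built-in substring search, instead of A's manual slide of a 7-char window over every position with a list-membership test.
import Mathlib
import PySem

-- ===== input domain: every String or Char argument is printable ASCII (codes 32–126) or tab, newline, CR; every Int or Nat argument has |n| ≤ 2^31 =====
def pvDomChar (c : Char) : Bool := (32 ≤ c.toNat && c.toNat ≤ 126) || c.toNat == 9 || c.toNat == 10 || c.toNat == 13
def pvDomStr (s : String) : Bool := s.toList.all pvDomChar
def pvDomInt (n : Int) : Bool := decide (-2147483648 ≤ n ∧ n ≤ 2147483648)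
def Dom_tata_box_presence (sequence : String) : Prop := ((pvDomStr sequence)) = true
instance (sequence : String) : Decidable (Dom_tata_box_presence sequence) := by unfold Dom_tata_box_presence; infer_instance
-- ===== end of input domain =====

-- B replaces A's manual 7-char sliding window + list membership by a loop over the
-- four motifs with a substring search (idiomatic; same asymptotic cost).

-- ===== PORT A =====
-- A's local list 'motifs'
def tataMotifsA : List (List Char) :=
  ["TATAAAA".toList, "TATAATA".toList, "TATATAA".toList, "TATATTA".toList]

-- the 'for i in range(len(sequence)-6)' loop with early return
def tataLoopA (l : List Char) : List Int → Int
  | [] => 0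
  | i :: rest =>
      if tataMotifsA.contains (PySem.List.slice l (some i) (some (i + 7))) then 1
      else tataLoopA l rest

def tata_box_presence (sequence : String) : Int :=
  let l := PySem.Chars.upper sequence.toList
  tataLoopA l (PySem.List.pyRange 0 ((l.length : Int) - 6) 1)

-- ===== PORT B =====
def tataMotifsB : List (List Char) :=
  ["TATAAAA".toList, "TATAATA".toList, "TATATAA".toList, "TATATTA".toList]

def tata_box_presence_alt (sequence : String) : Int :=
  let l := PySem.Chars.upper sequence.toList
  if tataMotifsB.any (fun m => PySem.Chars.isIn m l) then 1 else 0

-- ===== PRECONDITION & SPEC =====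
def Spec_tata_box_presence (sequence : String) (out : Int) : Prop := out = tata_box_presence_alt sequence
instance (sequence : String) (out : Int) : Decidable (Spec_tata_box_presence sequence out) := by unfold Spec_tata_box_presence; infer_instance

-- ===== CLAIM (what is proved, stated in full; the proofs are below) =====
def Claim_equal_tata_box_presence : Prop := ∀ (sequence : String), Dom_tata_box_presence sequence → Spec_tata_box_presence sequence (tata_box_presence sequence)

-- ===== LEMMAS AND PROOFS =====

lemma tataLoopA_eq_any (l : List Char) (idxs : List Int) :
    tataLoopA l idxs =
      if idxs.any (fun i => tataMotifsA.contains (PySem.List.slice l (some i) (some (i + 7)))) then 1 else 0 := by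
  induction idxs with
  | nil => simp [tataLoopA]
  | cons i rest ih =>
      simp only [tataLoopA, List.any_cons]
      by_cases h : PySem.List.slice l (some i) (some (i + 7)) ∈ tataMotifsA
      · simp [h]
      · simp [h, ih]

lemma tataMotifs_len : ∀ m ∈ tataMotifsA, m.length = 7 := by decide

lemma tata_any_iff (l : List Char) :
    ((PySem.List.pyRange 0 ((l.length : Int) - 6) 1).any
        (fun i => tataMotifsA.contains (PySem.List.slice l (some i) (some (i + 7)))) = true)
      ↔ (tataMotifsA.any (fun m => PySem.Chars.isIn m l) = true) := by
  simp only [List.any_eq_true]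
  constructor
  · rintro ⟨i, hi, hmem⟩
    rw [PySem.List.mem_pyRange_one] at hi
    obtain ⟨h0, _⟩ := hi
    refine ⟨_, List.contains_iff_mem.mp hmem, ?_⟩
    rw [← PySem.Chars.exists_prefix_drop_iff_isIn]
    refine ⟨i.toNat, ?_⟩
    rw [PySem.List.slice_toNat l h0 (by omega)]
    have : (i + 7).toNat - i.toNat = 7 := by omega
    rw [this]
    exact List.take_prefix _ _
  · rintro ⟨m, hm, hin⟩
    rw [← PySem.Chars.exists_prefix_drop_iff_isIn] at hin
    obtain ⟨j, hpre⟩ := hin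
    have hlen7 : m.length = 7 := tataMotifs_len m hm
    have hle : m.length ≤ (l.drop j).length := hpre.length_le
    rw [List.length_drop] at hle
    refine ⟨(j : Int), ?_, ?_⟩
    · rw [PySem.List.mem_pyRange_one]
      constructor
      · exact Int.natCast_nonneg j
      · omega
    · have heq : PySem.List.slice l (some (j : Int)) (some ((j : Int) + 7)) = m := by
        rw [PySem.List.slice_toNat l (Int.natCast_nonneg j) (by positivity)]
        have h1 : ((j : Int) + 7).toNat - ((j : Int)).toNat = 7 := by omega
        have h2 : ((j : Int)).toNat = j := Int.toNat_natCast j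
        rw [h1, h2]
        have := List.prefix_iff_eq_take.mp hpre
        rw [← hlen7]
        exact this.symm
      rw [heq]
      exact List.contains_iff_mem.mpr hm

-- ===== VERDICT (by name: the statement is the Claim_ definition above) =====
theorem tata_box_presence_spec : Claim_equal_tata_box_presence := by
  intro s _
  unfold Spec_tata_box_presence tata_box_presence tata_box_presence_alt
  rw [tataLoopA_eq_any]
  by_cases h : (tataMotifsA.any (fun m => PySem.Chars.isIn m (PySem.Chars.upper s.toList)) = true)
  · rw [if_pos ((tata_any_iff _).mpr h), if_pos (by exact h)]
  · rw [if_neg (fun hc => h ((tata_any_iff _).mp hc)), if_neg (by exact h)]
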